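-- pv_equiv track=rewrite | github.com/akshaysp97/Data-Mining | Frequent Itemsets/Triangular_Matrix_Method.py | get_item_dict
-- ===== SOURCE A (Python) =====
-- def get_item_dict(baskets):
--     # Assign each item (artist_id) an integer to be used as index in the matrix
--     item_dict = {}
--     for basket in baskets:
--         items = basket[1] #basket[0] is user_id, basket[1] is a list of artist_id
--         for item in items:
--             if item not in item_dict:
--                 item_dict[item] = len(item_dict)
--     return item_dict
-- ===== SOURCE B (Python) =====
-- def get_item_dict(baskets):
--     # Sort-by-first-occurrence algorithm: no membership tests at all.
--     # 1) flatten; 2) reverse overwrite-scan records each item's EARLIEST position;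
--     # 3) sort items by that position; 4) rank them.
--     stream = [item for basket in baskets for item in basket[1]]
--     first = {}
--     for pos, item in reversed(list(enumerate(stream))):
--         first[item] = pos  # later writes (smaller pos) win -> earliest occurrence
--     order = sorted(first.items(), key=lambda kv: kv[1])
--     return {item: rank for rank, (item, _pos) in enumerate(order)}
-- ===== Notes on version B (the rewrite author's own statement) =====
-- stated objective: alternative
-- what changed: A's single fused scan with a per-item membership test is replaced by a different algorithm: flatten the baskets, record each item's earliest position by an overwriting reverse scan (no membership tests), sort the items by that first position, and rank them.
import Mathlib
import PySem

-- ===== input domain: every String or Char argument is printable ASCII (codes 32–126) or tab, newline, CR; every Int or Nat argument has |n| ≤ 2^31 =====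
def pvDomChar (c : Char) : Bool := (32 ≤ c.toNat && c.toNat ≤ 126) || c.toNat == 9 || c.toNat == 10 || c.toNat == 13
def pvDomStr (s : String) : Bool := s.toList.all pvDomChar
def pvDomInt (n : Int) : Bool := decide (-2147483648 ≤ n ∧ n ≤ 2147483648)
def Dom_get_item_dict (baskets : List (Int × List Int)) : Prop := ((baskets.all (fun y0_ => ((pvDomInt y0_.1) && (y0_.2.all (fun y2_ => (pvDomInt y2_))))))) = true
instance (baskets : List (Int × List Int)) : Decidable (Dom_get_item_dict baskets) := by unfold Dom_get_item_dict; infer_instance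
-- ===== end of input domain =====

-- B replaces A's fused membership-test scan by a different algorithm: flatten, record each
-- item's earliest position with a reverse overwrite-scan, sort by that position, rank; objective: alternative.

-- ===== PORT A =====
-- for basket in baskets: for item in basket[1]: if item not in item_dict: item_dict[item] = len(item_dict)
def get_item_dict (baskets : List (Int × List Int)) : List (Int × Int) :=
  (baskets.foldl (fun item_dict basket =>
     basket.2.foldl (fun item_dict item =>
       if item_dict.contains item then item_dict
       else item_dict.insert item (item_dict.size : Int)) item_dict)
   (PySem.Dict.empty : PySem.Dict Int Int)).items

-- ===== PORT B =====
-- stream = [item for basket in baskets for item in basket[1]]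
-- for pos, item in reversed(list(enumerate(stream))): first[item] = pos
-- {item: rank for rank, (item, _pos) in enumerate(sorted(first.items(), key=lambda kv: kv[1]))}
def get_item_dict_alt (baskets : List (Int × List Int)) : List (Int × Int) :=
  let stream := baskets.flatMap (fun basket => basket.2)
  let first := ((PySem.List.enumerate stream 0).reverse).foldl
      (fun d p => d.insert p.2 p.1) (PySem.Dict.empty : PySem.Dict Int Int)
  let order := PySem.List.sorted first.items (fun kv => kv.2) false
  (PySem.List.enumerate order 0).map (fun p => (p.2.1, p.1))

-- ===== PRECONDITION & SPEC =====
def Spec_get_item_dict (baskets : List (Int × List Int)) (out : List (Int × Int)) : Prop := out = get_item_dict_alt baskets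
instance (baskets : List (Int × List Int)) (out : List (Int × Int)) : Decidable (Spec_get_item_dict baskets out) := by unfold Spec_get_item_dict; infer_instance

-- ===== CLAIM (what is proved, stated in full; the proofs are below) =====
def Claim_equal_get_item_dict : Prop := ∀ (baskets : List (Int × List Int)), Dom_get_item_dict baskets → Spec_get_item_dict baskets (get_item_dict baskets)

-- ===== LEMMAS AND PROOFS =====

-- A's dict after seeing the distinct-item list s, expressed as "enumerate s and swap the pairs"
def pvMkd (s : List Int) : PySem.Dict Int Int :=
  PySem.Dict.mk ((PySem.List.enumerate s 0).map (fun p => (p.2, p.1)))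

def pvStep (d : PySem.Dict Int Int) (item : Int) : PySem.Dict Int Int :=
  if d.contains item then d else d.insert item (d.size : Int)

theorem pvMkd_keys (s : List Int) : (pvMkd s).keys = s := by
  simp only [pvMkd, PySem.Dict.keys, List.map_map]
  have : ((fun (x : Int × Int) => x.1) ∘ fun (p : Int × Int) => (p.2, p.1)) = (fun p => p.2) := rfl
  rw [this, PySem.List.map_snd_enumerate]

theorem pvMkd_size (s : List Int) : (pvMkd s).size = s.length := by
  simp [pvMkd, PySem.Dict.size, PySem.List.length_enumerate]

theorem pvMkd_append (s : List Int) (x : Int) :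
    pvMkd (s ++ [x]) = PySem.Dict.mk ((pvMkd s).items ++ [(x, (s.length : Int))]) := by
  simp [pvMkd, PySem.List.enumerate_append, PySem.List.enumerate_cons]

theorem pvStep_mkd (s : List Int) (x : Int) :
    pvStep (pvMkd s) x = pvMkd (PySem.Set.add s x) := by
  unfold pvStep
  have hc : (pvMkd s).contains x = decide (x ∈ s) := by
    rw [PySem.Dict.contains_eq_decide_mem_keys, pvMkd_keys]
  by_cases hx : x ∈ s
  · rw [hc, PySem.Set.add_of_mem hx]; simp [hx]
  · rw [hc]; simp only [hx, decide_false, Bool.false_eq_true, if_false]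
    rw [PySem.Set.add_of_not_mem hx, pvMkd_append]
    have hnc : (pvMkd s).contains x = false := by rw [hc]; simp [hx]
    apply PySem.Dict.ext
    rw [PySem.Dict.items_insert, hnc, pvMkd_size]
    simp

theorem pv_inner (l : List Int) (s : List Int) (hnd : s.Nodup) :
    l.foldl pvStep (pvMkd s) = pvMkd (PySem.Set.update s l) := by
  induction l generalizing s with
  | nil => simp [PySem.Set.update_nil]
  | cons x l ih =>
      rw [List.foldl_cons, pvStep_mkd s x, PySem.Set.update_cons,
        ih _ (PySem.Set.nodup_add _ _ hnd)]

theorem pv_outer (bs : List (Int × List Int)) (s : List Int) (hnd : s.Nodup) :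
    bs.foldl (fun d b => b.2.foldl pvStep d) (pvMkd s)
      = pvMkd (bs.foldl (fun s b => PySem.Set.update s b.2) s) := by
  induction bs generalizing s with
  | nil => rfl
  | cons b bs ih =>
      rw [List.foldl_cons, pv_inner b.2 s hnd, List.foldl_cons,
        ih _ (PySem.Set.nodup_update _ _ hnd)]

theorem pv_collect (bs : List (Int × List Int)) (s : List Int) :
    bs.foldl (fun s b => PySem.Set.update s b.2) s
      = PySem.Set.update s (bs.flatMap (fun b => b.2)) := by
  induction bs generalizing s with
  | nil => simp [PySem.Set.update_nil]
  | cons b bs ih =>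
      rw [List.foldl_cons, ih, List.flatMap_cons, PySem.Set.update_append]

-- A = the swapped enumeration of the ordered-distinct items of the flattened stream
theorem pvA_char (baskets : List (Int × List Int)) :
    get_item_dict baskets
      = (PySem.List.enumerate (PySem.Set.ofList (baskets.flatMap (fun b => b.2))) 0).map
          (fun p => (p.2, p.1)) := by
  have h0 : (PySem.Dict.empty : PySem.Dict Int Int) = pvMkd [] := rfl
  unfold get_item_dict
  rw [h0]
  have : (fun (item_dict : PySem.Dict Int Int) (item : Int) =>
      if item_dict.contains item then item_dict
      else item_dict.insert item (item_dict.size : Int)) = pvStep := rfl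
  rw [this, pv_outer baskets [] List.nodup_nil, pv_collect]
  rw [PySem.Set.update_nil_left]
  rfl

-- ---- B-side lemmas ----

-- the reverse overwrite-fold looks up to the FIRST matching pair of l
theorem pv_revfold_get? (l : List (Int × Int)) (d : PySem.Dict Int Int) (x : Int) :
    ((l.reverse.foldl (fun d p => d.insert p.2 p.1) d).get? x)
      = ((l.find? (fun p => p.2 == x)).map (fun p => p.1)).or (d.get? x) := by
  induction l generalizing d with
  | nil => simp
  | cons a t ih =>
      rw [List.reverse_cons, List.foldl_append, List.foldl_cons, List.foldl_nil]
      by_cases hx : a.2 = x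
      · rw [List.find?_cons_of_pos (by simp [hx])]
        simp [← hx, PySem.Dict.get?_insert_self]
      · rw [List.find?_cons_of_neg (by simp [hx]),
          PySem.Dict.get?_insert_of_ne _ a.1 (Ne.symm hx), ih]

-- searching an enumeration for value x finds (start + first index of x, x)
theorem pv_find_enumerate (x : Int) (stream : List Int) : ∀ (s : Int), x ∈ stream →
    (PySem.List.enumerate stream s).find? (fun p => p.2 == x)
      = some (s + (stream.idxOf x : Int), x) := by
  induction stream with
  | nil => intro s h; cases h
  | cons y t ih =>
      intro s hx
      rw [PySem.List.enumerate_cons]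
      by_cases hyx : y = x
      · rw [List.find?_cons_of_pos (by simp [hyx])]
        subst hyx
        simp
      · rw [List.find?_cons_of_neg (by simp [hyx])]
        have hxt : x ∈ t := by
          cases hx with
          | head => exact absurd rfl hyx
          | tail _ h => exact h
        rw [ih (s + 1) hxt, List.idxOf_cons]
        have hne : (y == x) = false := by simp [hyx]
        rw [hne]
        simp only [cond_false]
        have h2 : s + 1 + (t.idxOf x : Int) = s + ((t.idxOf x + 1 : Nat) : Int) := by
          push_cast; ring
        rw [h2]

-- distinct items, in first-appearance order, have strictly increasing first indices
theorem pv_pairwise_idxOf (xs : List Int) :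
    (PySem.Set.ofList xs).Pairwise (fun a b => xs.idxOf a < xs.idxOf b) := by
  induction xs with
  | nil => simp [PySem.Set.ofList_nil]
  | cons x t ih =>
      rw [PySem.Set.ofList_cons]
      constructor
      · intro b hb
        have hb' := (PySem.Set.mem_discard _ _ _).1 hb
        have hxb : (x == b) = false := beq_eq_false_iff_ne.mpr (Ne.symm hb'.2)
        rw [List.idxOf_cons, List.idxOf_cons, hxb]
        simp only [beq_self_eq_true, cond_true, cond_false]
        omega
      · have hsub : (PySem.Set.discard (PySem.Set.ofList t) x).Sublist (PySem.Set.ofList t) := by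
          simp only [PySem.Set.discard]
          exact List.filter_sublist
        have hpw := List.Pairwise.sublist hsub ih
        refine hpw.imp_of_mem ?_
        intro a b ha hb hab
        have ha' := (PySem.Set.mem_discard _ _ _).1 ha
        have hb' := (PySem.Set.mem_discard _ _ _).1 hb
        have hxa : (x == a) = false := beq_eq_false_iff_ne.mpr (Ne.symm ha'.2)
        have hxb : (x == b) = false := beq_eq_false_iff_ne.mpr (Ne.symm hb'.2)
        rw [List.idxOf_cons, List.idxOf_cons, hxa, hxb]
        simp only [cond_false]
        omega

-- enumerate of a mapped list
theorem pv_enumerate_map {α β : Type} (f : α → β) (l : List α) (s : Int) :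
    PySem.List.enumerate (l.map f) s = (PySem.List.enumerate l s).map (fun p => (p.1, f p.2)) := by
  induction l generalizing s with
  | nil => simp [PySem.List.enumerate_nil]
  | cons a t ih => rw [List.map_cons, PySem.List.enumerate_cons, PySem.List.enumerate_cons,
      List.map_cons, ih]

-- B's sorted pair list IS the ordered-distinct items tagged with their first indices
theorem pvB_sorted (stream : List Int) :
    PySem.List.sorted
      (((PySem.List.enumerate stream 0).reverse).foldl
        (fun d p => d.insert p.2 p.1) (PySem.Dict.empty : PySem.Dict Int Int)).items
      (fun kv => kv.2) false
    = (PySem.Set.ofList stream).map (fun x => (x, (stream.idxOf x : Int))) := by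
  set first := ((PySem.List.enumerate stream 0).reverse).foldl
        (fun d p => d.insert p.2 p.1) (PySem.Dict.empty : PySem.Dict Int Int) with hfirst
  have hkeys : first.keys = PySem.Set.ofList stream.reverse := by
    have h := PySem.Dict.keys_foldl_insert_key (ν := Int)
      ((PySem.List.enumerate stream 0).reverse) (fun p : Int × Int => p.2)
      (fun d p => p.1) PySem.Dict.empty
    simp only [] at h
    rw [hfirst, h]
    simp [PySem.Set.update_nil_left, List.map_reverse, PySem.List.map_snd_enumerate]
  have hnodup : first.keys.Nodup := by
    rw [hkeys]; exact PySem.Set.nodup_ofList _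
  have hget : ∀ x ∈ stream, first.getD x 0 = (stream.idxOf x : Int) := by
    intro x hx
    rw [hfirst, PySem.Dict.getD_eq_get?_getD, pv_revfold_get?, pv_find_enumerate x stream 0 hx]
    simp
  have hitems : first.items
      = (PySem.Set.ofList stream.reverse).map (fun x => (x, (stream.idxOf x : Int))) := by
    rw [PySem.Dict.items_eq_map_keys first hnodup 0, hkeys]
    refine List.map_congr_left ?_
    intro x hx
    have hxs : x ∈ stream := by
      have := (PySem.Set.mem_ofList _ _).1 hx
      simpa using this
    rw [hget x hxs]
  apply PySem.List.sorted_eq_of_perm_of_pairwise_lt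
  · rw [hitems]
    refine List.Perm.map _ ?_
    rw [List.perm_ext_iff_of_nodup (PySem.Set.nodup_ofList _) (PySem.Set.nodup_ofList _)]
    intro a
    simp [PySem.Set.mem_ofList]
  · refine List.Pairwise.map _ ?_ (pv_pairwise_idxOf stream)
    intro a b h
    dsimp only
    exact_mod_cast h

-- ===== VERDICT (by name: the statement is the Claim_ definition above) =====
theorem get_item_dict_spec : Claim_equal_get_item_dict := by
  intro baskets _
  show get_item_dict baskets = get_item_dict_alt baskets
  rw [pvA_char]
  show (PySem.List.enumerate (PySem.Set.ofList (baskets.flatMap fun b => b.2)) 0).map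
        (fun p => (p.2, p.1))
      = (PySem.List.enumerate (PySem.List.sorted
          (((PySem.List.enumerate (baskets.flatMap fun basket => basket.2) 0).reverse).foldl
            (fun d p => d.insert p.2 p.1) (PySem.Dict.empty : PySem.Dict Int Int)).items
          (fun kv => kv.2) false) 0).map (fun p => (p.2.1, p.1))
  rw [pvB_sorted, pv_enumerate_map, List.map_map]
  rfl
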